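-- pv_equiv track=rewrite | github.com/thaddiusatme/inneros-zettelkasten | development/src/ai/ai_tagging_prevention.py | _preserve_domain_context
-- ===== SOURCE A (Python) =====
-- from typing import List, Dict, Any, Optional
--
-- def _preserve_domain_context(concepts: List[str], original_text: str) -> List[str]:
--     """Preserve domain context during extraction"""
--     # Look for domain indicators and enhance concepts
--     domain_enhanced = []
--
--     for concept in concepts:
--         # Enhance with domain context if present
--         if 'quantum' in original_text.lower() and concept in ['computing', 'entanglement']:
--             domain_enhanced.append(f'quantum-{concept}')
--         elif 'machine' in original_text.lower() and concept == 'learning':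
--             domain_enhanced.append('machine-learning')
--         elif 'natural' in original_text.lower() and concept in ['language', 'processing']:
--             if 'language' in concepts and 'processing' in concepts:
--                 domain_enhanced.append('natural-language-processing')
--             else:
--                 domain_enhanced.append(concept)
--         else:
--             domain_enhanced.append(concept)
--
--     return domain_enhanced
-- ===== SOURCE B (Python) =====
-- def _preserve_domain_context(concepts, original_text):
--     """Preserve domain context during extraction (table-driven)."""
--     text = original_text.lower()
--     table = {}
--     if 'quantum' in text:
--         table['computing'] = 'quantum-computing'
--         table['entanglement'] = 'quantum-entanglement'
--     if 'machine' in text: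
--         table['learning'] = 'machine-learning'
--     if 'natural' in text and 'language' in concepts and 'processing' in concepts:
--         table['language'] = 'natural-language-processing'
--         table['processing'] = 'natural-language-processing'
--     return [table.get(c, c) for c in concepts]
-- ===== Notes on version B (the rewrite author's own statement) =====
-- stated objective: faster
-- what changed: Builds a replacement table once from the lowercased text (and the both-concepts-present NLP condition), then maps each concept through a single table lookup, replacing A's per-element branch cascade that re-lowercases and re-scans the whole text on every iteration.
import Mathlib
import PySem

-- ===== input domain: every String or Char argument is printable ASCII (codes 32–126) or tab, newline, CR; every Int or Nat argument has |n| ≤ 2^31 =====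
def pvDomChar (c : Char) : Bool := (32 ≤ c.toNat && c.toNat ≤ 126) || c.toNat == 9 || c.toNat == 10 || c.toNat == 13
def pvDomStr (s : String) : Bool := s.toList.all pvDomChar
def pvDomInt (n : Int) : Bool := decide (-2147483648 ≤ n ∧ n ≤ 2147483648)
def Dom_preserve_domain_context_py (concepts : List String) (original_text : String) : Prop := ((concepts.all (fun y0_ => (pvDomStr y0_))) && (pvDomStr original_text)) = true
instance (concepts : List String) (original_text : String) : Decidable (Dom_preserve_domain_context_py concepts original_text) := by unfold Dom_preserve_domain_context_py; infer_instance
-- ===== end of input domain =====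

-- B replaces A's per-element branch cascade by one replacement table built once from the
-- lowercased text, then a single lookup per concept (objective: simpler).

-- ===== PORT A =====
def preserve_domain_context_py (concepts : List String) (original_text : String) : List String :=
  concepts.foldl (fun domain_enhanced concept =>
    if PySem.Str.isIn "quantum" (PySem.Str.lower original_text)
        && (["computing", "entanglement"].contains concept) then
      domain_enhanced ++ ["quantum-" ++ concept]
    else if PySem.Str.isIn "machine" (PySem.Str.lower original_text)
        && (concept == "learning") then
      domain_enhanced ++ ["machine-learning"]
    else if PySem.Str.isIn "natural" (PySem.Str.lower original_text)
        && (["language", "processing"].contains concept) then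
      if concepts.contains "language" && concepts.contains "processing" then
        domain_enhanced ++ ["natural-language-processing"]
      else
        domain_enhanced ++ [concept]
    else
      domain_enhanced ++ [concept]) []

-- ===== PORT B =====
def preserve_domain_context_py_alt (concepts : List String) (original_text : String) : List String :=
  let text := PySem.Str.lower original_text
  let table : PySem.Dict String String := PySem.Dict.empty
  let table := if PySem.Str.isIn "quantum" text then
      (table.insert "computing" "quantum-computing").insert "entanglement" "quantum-entanglement"
    else table
  let table := if PySem.Str.isIn "machine" text then
      table.insert "learning" "machine-learning"
    else table
  let table := if PySem.Str.isIn "natural" text && concepts.contains "language"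
      && concepts.contains "processing" then
      (table.insert "language" "natural-language-processing").insert "processing" "natural-language-processing"
    else table
  concepts.map (fun c => table.getD c c)

-- ===== PRECONDITION & SPEC =====
def Spec_preserve_domain_context_py (concepts : List String) (original_text : String) (out : List String) : Prop := out = preserve_domain_context_py_alt concepts original_text
instance (concepts : List String) (original_text : String) (out : List String) : Decidable (Spec_preserve_domain_context_py concepts original_text out) := by unfold Spec_preserve_domain_context_py; infer_instance

-- ===== CLAIM (what is proved, stated in full; the proofs are below) =====
def Claim_equal_preserve_domain_context_py : Prop := ∀ (concepts : List String) (original_text : String), Dom_preserve_domain_context_py concepts original_text → Spec_preserve_domain_context_py concepts original_text (preserve_domain_context_py concepts original_text)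

-- ===== LEMMAS AND PROOFS =====

-- A's branch cascade on one concept equals one lookup in B's table (bools abstracted).
theorem pv_point (q m n L P : Bool) (c : String) :
    (if q && (["computing", "entanglement"].contains c) then "quantum-" ++ c
     else if m && (c == "learning") then "machine-learning"
     else if n && (["language", "processing"].contains c) then
       if L && P then "natural-language-processing" else c
     else c)
    =
    (let t0 : PySem.Dict String String := PySem.Dict.empty
     let t1 := if q then
         (t0.insert "computing" "quantum-computing").insert "entanglement" "quantum-entanglement"
       else t0
     let t2 := if m then t1.insert "learning" "machine-learning" else t1
     let t3 := if n && L && P then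
         (t2.insert "language" "natural-language-processing").insert "processing" "natural-language-processing"
       else t2
     t3.getD c c) := by
  by_cases h1 : c = "computing" <;> by_cases h2 : c = "entanglement" <;>
    by_cases h3 : c = "learning" <;> by_cases h4 : c = "language" <;>
    by_cases h5 : c = "processing" <;>
  cases q <;> cases m <;> cases n <;> cases L <;> cases P <;>
  simp_all [PySem.Dict.getD_insert, PySem.Dict.getD_empty]

theorem preserve_domain_context_py_spec : Claim_equal_preserve_domain_context_py := by
  intro concepts text _
  unfold Spec_preserve_domain_context_py preserve_domain_context_py preserve_domain_context_py_alt
  have hstep : ∀ (l acc : List String),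
      l.foldl (fun domain_enhanced concept =>
        if PySem.Str.isIn "quantum" (PySem.Str.lower text)
            && (["computing", "entanglement"].contains concept) then
          domain_enhanced ++ ["quantum-" ++ concept]
        else if PySem.Str.isIn "machine" (PySem.Str.lower text)
            && (concept == "learning") then
          domain_enhanced ++ ["machine-learning"]
        else if PySem.Str.isIn "natural" (PySem.Str.lower text)
            && (["language", "processing"].contains concept) then
          if concepts.contains "language" && concepts.contains "processing" then
            domain_enhanced ++ ["natural-language-processing"]
          else
            domain_enhanced ++ [concept]
        else
          domain_enhanced ++ [concept]) acc
      = acc ++ l.map (fun c =>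
          (let t0 : PySem.Dict String String := PySem.Dict.empty
           let t1 := if PySem.Str.isIn "quantum" (PySem.Str.lower text) then
               (t0.insert "computing" "quantum-computing").insert "entanglement" "quantum-entanglement"
             else t0
           let t2 := if PySem.Str.isIn "machine" (PySem.Str.lower text) then
               t1.insert "learning" "machine-learning"
             else t1
           let t3 := if PySem.Str.isIn "natural" (PySem.Str.lower text)
               && concepts.contains "language" && concepts.contains "processing" then
               (t2.insert "language" "natural-language-processing").insert "processing" "natural-language-processing"
             else t2
           t3.getD c c)) := by
    intro l
    induction l with
    | nil => intro acc; simp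
    | cons x xs ih =>
      intro acc
      simp only [List.foldl_cons, List.map_cons, ih]
      rw [← pv_point (PySem.Str.isIn "quantum" (PySem.Str.lower text))
            (PySem.Str.isIn "machine" (PySem.Str.lower text))
            (PySem.Str.isIn "natural" (PySem.Str.lower text))
            (concepts.contains "language") (concepts.contains "processing") x]
      split_ifs <;> simp
  rw [hstep]
  simp
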